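-- pv_equiv track=rewrite | github.com/zuiho1595440844/POLAR | ui/gradio_interface.py | _go_star_points
-- ===== SOURCE A (Python) =====
-- from typing import Any, Dict, List, Optional, Tuple
--
-- def _go_star_points(sz: int) -> List[Tuple[int, int]]:
--     if sz == 9:
--         pts = [2, 4, 6]
--     elif sz == 13:
--         pts = [3, 6, 9]
--     elif sz == 19:
--         pts = [3, 9, 15]
--     else:
--         return []
--     return [(r, c) for r in pts for c in pts]
-- ===== SOURCE B (Python) =====
-- def _go_star_points(sz):
--     if sz not in (9, 13, 19):
--         return []
--     m = 2 if sz == 9 else 3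
--     def star_line(v):
--         return v == m or v == sz // 2 or v == sz - 1 - m
--     return [(r, c) for r in range(sz) for c in range(sz)
--             if star_line(r) and star_line(c)]
-- ===== Notes on version B (the rewrite author's own statement) =====
-- stated objective: alternative
-- what changed: Instead of hardcoding a coordinate triple and taking its Cartesian product, B scans every cell of the sz x sz board and keeps the cells whose row and column both satisfy an arithmetic star-line predicate (v equals the margin, the center sz//2, or sz-1-margin), a grid filter rather than a table product.
import Mathlib
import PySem

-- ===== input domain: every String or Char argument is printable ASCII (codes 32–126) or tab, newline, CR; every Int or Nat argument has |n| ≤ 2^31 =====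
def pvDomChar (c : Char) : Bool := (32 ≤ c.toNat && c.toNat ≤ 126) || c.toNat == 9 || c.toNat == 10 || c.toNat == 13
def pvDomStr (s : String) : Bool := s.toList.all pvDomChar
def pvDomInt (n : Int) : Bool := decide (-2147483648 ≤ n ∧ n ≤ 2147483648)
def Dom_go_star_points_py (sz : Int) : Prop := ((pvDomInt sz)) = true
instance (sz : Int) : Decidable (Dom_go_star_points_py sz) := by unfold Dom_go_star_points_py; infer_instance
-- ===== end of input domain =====

-- ===== PORT A =====
-- A: hardcoded triple of star-point coordinates per board size, then Cartesian product.
def go_star_points_py (sz : Int) : List (Int × Int) :=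
  if sz = 9 then
    ([2, 4, 6] : List Int).flatMap (fun r => ([2, 4, 6] : List Int).map (fun c => (r, c)))
  else if sz = 13 then
    ([3, 6, 9] : List Int).flatMap (fun r => ([3, 6, 9] : List Int).map (fun c => (r, c)))
  else if sz = 19 then
    ([3, 9, 15] : List Int).flatMap (fun r => ([3, 9, 15] : List Int).map (fun c => (r, c)))
  else []

-- ===== PORT B =====
-- B: filter the full sz×sz grid by an arithmetic star-line predicate (different traversal, not a table product).
def pvStarLine (sz m v : Int) : Bool :=
  v = m || v = PySem.Int.floordiv sz 2 || v = sz - 1 - m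

def go_star_points_py_alt (sz : Int) : List (Int × Int) :=
  if sz ≠ 9 ∧ sz ≠ 13 ∧ sz ≠ 19 then []
  else
    let m : Int := if sz = 9 then 2 else 3
    (PySem.List.pyRange 0 sz 1).flatMap (fun r =>
      ((PySem.List.pyRange 0 sz 1).filter (fun c => pvStarLine sz m r && pvStarLine sz m c)).map
        (fun c => (r, c)))

-- ===== PRECONDITION & SPEC =====
def Spec_go_star_points_py (sz : Int) (out : List (Int × Int)) : Prop := out = go_star_points_py_alt sz
instance (sz : Int) (out : List (Int × Int)) : Decidable (Spec_go_star_points_py sz out) := by unfold Spec_go_star_points_py; infer_instance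

-- ===== CLAIM (what is proved, stated in full; the proofs are below) =====
def Claim_equal_go_star_points_py : Prop := ∀ (sz : Int), Dom_go_star_points_py sz → Spec_go_star_points_py sz (go_star_points_py sz)

-- ===== LEMMAS AND PROOFS =====

-- ===== VERDICT (by name: the statement is the Claim_ definition above) =====
theorem go_star_points_py_spec : Claim_equal_go_star_points_py := by
  intro sz _
  unfold Spec_go_star_points_py go_star_points_py go_star_points_py_alt
  by_cases h9 : sz = 9
  · subst h9; decide
  by_cases h13 : sz = 13
  · subst h13; decide
  by_cases h19 : sz = 19
  · subst h19; decide
  simp [h9, h13, h19]
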